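-- pv_equiv track=rewrite | github.com/pioneer1541/jarvis-mcp-stack | patch_hide_raw_tools_v2.py | patch_decorators
-- ===== SOURCE A (Python) =====
-- TARGETS = {
--     "web_search": True,
--     "open_url_extract": True,
--     "open_url": True,
-- }
--
-- def patch_decorators(lines):
--     out = []
--     pending_mcp_tool = False
--     pending_tool_line = ""
--     pending_tool_idx = -1
--     commented = 0
--
--     for i, line in enumerate(lines):
--         s = line.lstrip()
--
--         if pending_mcp_tool:
--             # Expect next meaningful line to be "def <name>("
--             ss = s
--             if ss.startswith("def "):
--                 # def name(
--                 name_part = ss[4:]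
--                 name = name_part.split("(", 1)[0].strip()
--                 if name in TARGETS:
--                     # comment the previously stored decorator line
--                     out[pending_tool_idx] = "# " + pending_tool_line
--                     commented += 1
--             pending_mcp_tool = False
--             pending_tool_line = ""
--             pending_tool_idx = -1
--
--         # store the decorator line if it is @mcp.tool(...)
--         if s.startswith("@mcp.tool(") and (not s.startswith("#")):
--             pending_mcp_tool = True
--             pending_tool_line = line
--             pending_tool_idx = len(out)
--
--         out.append(line)
--
--     return out, commented
-- ===== SOURCE B (Python) =====
-- TARGETS = {
--     "web_search": True,
--     "open_url_extract": True,
--     "open_url": True,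
-- }
--
-- def _comment_here(cur, nxt):
--     # comment `cur` iff it is an @mcp.tool(...) decorator and the very next
--     # line defines a target function
--     if not cur.lstrip().startswith("@mcp.tool("):
--         return False
--     ss = nxt.lstrip()
--     if not ss.startswith("def "):
--         return False
--     return ss[4:].split("(", 1)[0].strip() in TARGETS
--
-- def patch_decorators(lines):
--     out = []
--     commented = 0
--     for cur, nxt in zip(lines, lines[1:]):
--         if _comment_here(cur, nxt):
--             out.append("# " + cur)
--             commented += 1
--         else:
--             out.append(cur)
--     out.extend(lines[len(lines) - 1:])  # the last line (if any) has no successor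
--     return out, commented
-- ===== Notes on version B (the rewrite author's own statement) =====
-- stated objective: simpler
-- what changed: Replaces A's carried pending-state machine (pending flag, stored line, stored index, in-place patching of out) with a stateless recursive pass that decides each line by a direct look-ahead at its immediate successor.
import Mathlib
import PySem

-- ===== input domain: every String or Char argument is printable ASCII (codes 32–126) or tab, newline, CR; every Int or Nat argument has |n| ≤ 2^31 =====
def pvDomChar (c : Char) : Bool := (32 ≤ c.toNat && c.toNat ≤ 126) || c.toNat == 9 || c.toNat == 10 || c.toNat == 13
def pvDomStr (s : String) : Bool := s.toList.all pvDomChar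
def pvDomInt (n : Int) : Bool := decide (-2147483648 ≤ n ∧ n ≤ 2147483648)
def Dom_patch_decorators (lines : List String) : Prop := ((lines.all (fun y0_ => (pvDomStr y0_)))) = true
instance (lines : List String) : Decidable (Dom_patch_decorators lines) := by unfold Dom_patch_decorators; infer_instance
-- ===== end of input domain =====

-- B replaces A's carried pending-state machine with a stateless recursive pass
-- using direct look-ahead at the next line (simpler; same return value).

-- ===== PORT A =====
def TARGETS : PySem.Dict String Bool :=
  PySem.Dict.ofList [("web_search", true), ("open_url_extract", true), ("open_url", true)]

-- the `if pending_mcp_tool:` block of A's loop body (updates out and commented)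
def pendingBlock (pending : Bool) (s : String) (out : List String) (pline : String)
    (pidx : Int) (commented : Int) : List String × Int :=
  if pending then
    if PySem.Str.startswith s "def " then
      let name_part := PySem.Str.slice s (some 4) none
      let name := PySem.Str.strip ((((PySem.Str.splitMax? name_part "(" 1).getD []).headD ""))
      if TARGETS.contains name then
        (PySem.List.pySetD out pidx ("# " ++ pline), commented + 1)
      else (out, commented)
    else (out, commented)
  else (out, commented)

-- the loop of A, carried state: out, pending_mcp_tool, pending_tool_line, pending_tool_idx, commented
def patchALoop : List String → List String → Bool → String → Int → Int → List String × Int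
  | [], out, _, _, _, commented => (out, commented)
  | line :: rest, out, pending, pline, pidx, commented =>
    let s := PySem.Str.lstrip line
    let oc := pendingBlock pending s out pline pidx commented
    if PySem.Str.startswith s "@mcp.tool(" && !(PySem.Str.startswith s "#") then
      patchALoop rest (oc.1 ++ [line]) true line (oc.1.length : Int) oc.2
    else
      patchALoop rest (oc.1 ++ [line]) false "" (-1) oc.2

def patch_decorators (lines : List String) : List String × Int :=
  patchALoop lines [] false "" (-1) 0

-- ===== PORT B =====
def commentHere (cur nxt : String) : Bool :=
  if !(PySem.Str.startswith (PySem.Str.lstrip cur) "@mcp.tool(") then false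
  else
    let ss := PySem.Str.lstrip nxt
    if !(PySem.Str.startswith ss "def ") then false
    else
      TARGETS.contains (PySem.Str.strip
        ((((PySem.Str.splitMax? (PySem.Str.slice ss (some 4) none) "(" 1).getD []).headD "")))

-- the zip(lines, lines[1:]) loop of B; the final non-pair tail (the last line, or
-- nothing) is appended unchanged, mirroring out.extend(lines[len(lines)-1:])
def patchBLoop : List String → List String → Int → List String × Int
  | cur :: nxt :: rest, out, commented =>
    if commentHere cur nxt then patchBLoop (nxt :: rest) (out ++ ["# " ++ cur]) (commented + 1)
    else patchBLoop (nxt :: rest) (out ++ [cur]) commented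
  | tail, out, commented => (out ++ tail, commented)

def patch_decorators_alt (lines : List String) : List String × Int :=
  patchBLoop lines [] 0

-- ===== PRECONDITION & SPEC =====
def Spec_patch_decorators (lines : List String) (out : List String × Int) : Prop := out = patch_decorators_alt lines
instance (lines : List String) (out : List String × Int) : Decidable (Spec_patch_decorators lines out) := by unfold Spec_patch_decorators; infer_instance

-- ===== CLAIM (what is proved, stated in full; the proofs are below) =====
def Claim_equal_patch_decorators : Prop := ∀ (lines : List String), Dom_patch_decorators lines → Spec_patch_decorators lines (patch_decorators lines)

-- ===== LEMMAS AND PROOFS =====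

-- a line starting with "@mcp.tool(" cannot start with "#"
theorem not_hash_of_at (s : String)
    (h : PySem.Str.startswith s "@mcp.tool(" = true) :
    PySem.Str.startswith s "#" = false := by
  by_contra hc
  rw [Bool.not_eq_false] at hc
  rw [PySem.Str.startswith_eq, PySem.Chars.startswith_iff] at h hc
  rcases h with ⟨t1, h1⟩
  rcases hc with ⟨t2, h2⟩
  rw [← h2] at h1
  simp at h1

-- shorthand: the condition under which A stores a pending decorator at `line`
def isDec (line : String) : Bool :=
  PySem.Str.startswith (PySem.Str.lstrip line) "@mcp.tool(" &&
    !(PySem.Str.startswith (PySem.Str.lstrip line) "#")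

-- shorthand: the lstripped line is "def <target>(…"
def targetDef (s : String) : Bool :=
  if PySem.Str.startswith s "def " then
    TARGETS.contains (PySem.Str.strip
      ((((PySem.Str.splitMax? (PySem.Str.slice s (some 4) none) "(" 1).getD []).headD "")))
  else false

theorem pendingBlock_false (s : String) (out : List String) (pl : String) (pi c : Int) :
    pendingBlock false s out pl pi c = (out, c) := rfl

theorem pendingBlock_true (s : String) (out : List String) (d : String) (c : Int) :
    pendingBlock true s (out ++ [d]) d (out.length : Int) c
      = if targetDef s then (out ++ ["# " ++ d], c + 1) else (out ++ [d], c) := by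
  unfold pendingBlock targetDef
  simp only [if_true]
  split
  · split
    · rw [PySem.List.pySetD_natCast, List.set_append_right _ _ (le_refl _)]
      simp
    · rfl
  · rfl

theorem commentHere_of_isDec (d nxt : String) (h : isDec d = true) :
    commentHere d nxt = targetDef (PySem.Str.lstrip nxt) := by
  unfold isDec at h
  simp only [Bool.and_eq_true] at h
  unfold commentHere targetDef
  rw [h.1]
  simp

theorem commentHere_of_not_isDec (d nxt : String) (h : isDec d = false) :
    commentHere d nxt = false := by
  unfold isDec at h
  unfold commentHere
  rcases hb : PySem.Str.startswith (PySem.Str.lstrip d) "@mcp.tool(" with _ | _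
  · simp
  · rw [hb, not_hash_of_at _ hb] at h
    simp at h

-- a non-decorator line is copied by B's loop and the pair window just moves on
theorem patchBLoop_cons_of_not_isDec (line : String) (rest : List String)
    (h : isDec line = false) (out : List String) (c : Int) :
    patchBLoop (line :: rest) out c = patchBLoop rest (out ++ [line]) c := by
  rcases rest with _ | ⟨n, rest'⟩
  · simp [patchBLoop]
  · rw [patchBLoop, commentHere_of_not_isDec _ _ h]
    simp

-- the key simultaneous invariant: A's loop from a clean state, and from a pending
-- state whose index points at the just-appended decorator, both track B's loop
theorem patchALoop_key (lines : List String) :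
    (∀ (out : List String) (pl : String) (pi c : Int),
      patchALoop lines out false pl pi c = patchBLoop lines out c)
    ∧ (∀ (d : String), isDec d = true → ∀ (out : List String) (c : Int),
      patchALoop lines (out ++ [d]) true d (out.length : Int) c
        = patchBLoop (d :: lines) out c) := by
  induction lines with
  | nil =>
    constructor
    · intro out pl pi c
      simp [patchALoop, patchBLoop]
    · intro d _ out c
      simp [patchALoop, patchBLoop]
  | cons line rest ih =>
    constructor
    · -- pending = false
      intro out pl pi c
      simp only [patchALoop, pendingBlock_false]
      rcases hd : isDec line with _ | _ <;> simp only [isDec] at hd <;> rw [hd]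
      · rw [if_neg (by simp), ih.1, ← patchBLoop_cons_of_not_isDec _ _ hd]
      · rw [if_pos rfl]
        exact ih.2 line hd out c
    · -- pending = true, stored decorator d sits at position out.length
      intro d hdec out c
      simp only [patchALoop, pendingBlock_true]
      have hB : patchBLoop (d :: line :: rest) out c
          = (if targetDef (PySem.Str.lstrip line)
              then patchBLoop (line :: rest) (out ++ ["# " ++ d]) (c + 1)
              else patchBLoop (line :: rest) (out ++ [d]) c) := by
        rw [patchBLoop, commentHere_of_isDec _ line hdec]
      rw [hB]
      rcases ht : targetDef (PySem.Str.lstrip line) with _ | _ <;>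
        simp only [if_true, if_false, Bool.false_eq_true] <;>
        rcases hd : isDec line with _ | _ <;> simp only [isDec] at hd <;> rw [hd]
      · rw [if_neg (by simp), ih.1, ← patchBLoop_cons_of_not_isDec _ _ hd]
      · rw [if_pos rfl]
        exact ih.2 line hd (out ++ [d]) c
      · rw [if_neg (by simp), ih.1, ← patchBLoop_cons_of_not_isDec _ _ hd]
      · rw [if_pos rfl]
        exact ih.2 line hd (out ++ ["# " ++ d]) (c + 1)

-- ===== VERDICT (by name: the statement is the Claim_ definition above) =====
theorem patch_decorators_spec : Claim_equal_patch_decorators := by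
  intro lines _
  unfold Spec_patch_decorators patch_decorators patch_decorators_alt
  exact (patchALoop_key lines).1 [] "" (-1) 0
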